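-- pv_equiv track=rewrite | github.com/LAF-US/IDAHO-VAULT | .github/scripts/daily_rollover.py | extract_todo_section
-- ===== SOURCE A (Python) =====
-- TODO_MARKER = "[[TO DO LIST]]"
--
-- def extract_todo_section(content: str) -> list[str]:
--     """
--     Return lines from the canonical [[TO DO LIST]] marker.
--
--     Stop at the next frontmatter-style separator, next-level header,
--     or end of file. Preserves organizational bullets (- WORK, - PERSONAL).
--     """
--     lines = content.splitlines()
--     in_todo = False
--     todo_lines = []
--     for line in lines:
--         if is_todo_marker(line):
--             in_todo = True
--             continue
--         if in_todo:
--             # Stop if we hit a substantial new section or divider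
--             if line.strip() == "---" or line.startswith("## ") or line.startswith("Notes:"):
--                 break
--             todo_lines.append(line)
--     return todo_lines
--
-- def is_todo_marker(line: str) -> bool:
--     return line.strip() == TODO_MARKER
-- ===== SOURCE B (Python) =====
-- TODO_MARKER = "[[TO DO LIST]]"
--
--
-- def is_todo_marker(line: str) -> bool:
--     return line.strip() == TODO_MARKER
--
--
-- def _is_stop(line: str) -> bool:
--     return line.strip() == "---" or line.startswith("## ") or line.startswith("Notes:")
--
--
-- def extract_todo_section(content: str) -> list[str]:
--     """Locate-then-extract: find the first marker line, drop any later marker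
--     lines from the tail, and slice up to the first stop line."""
--     lines = content.splitlines()
--     marker = next((i for i, l in enumerate(lines) if is_todo_marker(l)), None)
--     if marker is None:
--         return []
--     body = [l for l in lines[marker + 1:] if not is_todo_marker(l)]
--     stop = next((i for i, l in enumerate(body) if _is_stop(l)), len(body))
--     return body[:stop]
-- ===== Notes on version B (the rewrite author's own statement) =====
-- stated objective: alternative
-- what changed: Replaces A's single flag-gated scan with a locate-then-extract decomposition: find the index of the first marker line, filter later marker lines out of the tail, and slice the result up to the first separator/header/Notes line.
import Mathlib
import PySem

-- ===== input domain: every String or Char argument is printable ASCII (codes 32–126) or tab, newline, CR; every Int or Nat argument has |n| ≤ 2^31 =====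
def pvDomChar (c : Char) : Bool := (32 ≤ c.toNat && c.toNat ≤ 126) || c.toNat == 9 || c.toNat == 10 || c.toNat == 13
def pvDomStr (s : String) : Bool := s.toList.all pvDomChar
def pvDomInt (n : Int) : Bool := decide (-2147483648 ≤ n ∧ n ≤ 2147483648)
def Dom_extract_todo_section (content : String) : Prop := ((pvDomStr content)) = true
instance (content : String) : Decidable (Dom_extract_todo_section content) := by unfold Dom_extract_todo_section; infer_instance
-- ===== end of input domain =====

-- B replaces A's flag-gated single scan by a locate-then-extract decomposition:
-- find the marker index, filter later marker lines out of the tail, slice to the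
-- first stop line (objective: alternative decomposition, same cost).

-- ===== PORT A =====
-- is_todo_marker (shared helper of both Python files)
def pvIsTodoMarker (line : String) : Bool := PySem.Str.strip line == "[[TO DO LIST]]"

-- A's for-loop: state = (in_todo, todo_lines); 'break' returns the accumulator
def pvALoop : List String → Bool → List String → List String
  | [], _, acc => acc
  | l :: ls, inTodo, acc =>
    if pvIsTodoMarker l then pvALoop ls true acc
    else if inTodo then
      if PySem.Str.strip l == "---" || PySem.Str.startswith l "## " || PySem.Str.startswith l "Notes:" then
        acc
      else
        pvALoop ls inTodo (acc ++ [l])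
    else pvALoop ls inTodo acc

def extract_todo_section (content : String) : List String :=
  pvALoop (PySem.Str.splitlines content) false []

-- ===== PORT B =====
-- B's _is_stop helper
def pvIsStop (line : String) : Bool :=
  PySem.Str.strip line == "---" || PySem.Str.startswith line "## " || PySem.Str.startswith line "Notes:"

def extract_todo_section_alt (content : String) : List String :=
  let lines := PySem.Str.splitlines content
  match lines.findIdx? pvIsTodoMarker with
  | none => []
  | some marker =>
    let body := (lines.drop (marker + 1)).filter (fun l => !pvIsTodoMarker l)
    let stop := (body.findIdx? pvIsStop).getD body.length
    body.take stop

-- ===== PRECONDITION & SPEC =====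
def Spec_extract_todo_section (content : String) (out : List String) : Prop := out = extract_todo_section_alt content
instance (content : String) (out : List String) : Decidable (Spec_extract_todo_section content out) := by unfold Spec_extract_todo_section; infer_instance

-- ===== CLAIM (what is proved, stated in full; the proofs are below) =====
def Claim_equal_extract_todo_section : Prop := ∀ (content : String), Dom_extract_todo_section content → Spec_extract_todo_section content (extract_todo_section content)

-- ===== LEMMAS AND PROOFS =====

-- take up to the first index satisfying p is takeWhile (!p)
theorem pv_take_findIdx_eq_takeWhile {α : Type} (p : α → Bool) (l : List α) :
    l.take ((l.findIdx? p).getD l.length) = l.takeWhile (fun x => !p x) := by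
  induction l with
  | nil => rfl
  | cons x xs ih =>
    by_cases hx : p x
    · simp [List.findIdx?_cons, hx]
    · cases h : xs.findIdx? p with
      | none =>
        simp [List.findIdx?_cons, hx, h] at ih ⊢
        exact ih
      | some i =>
        simp [List.findIdx?_cons, hx, h] at ih ⊢
        exact ih

-- A's loop after the marker was seen = B's filter-then-takeWhile on the rest
theorem pv_phase2 (ls : List String) (acc : List String) :
    pvALoop ls true acc =
      acc ++ (ls.filter (fun l => !pvIsTodoMarker l)).takeWhile (fun l => !pvIsStop l) := by
  induction ls generalizing acc with
  | nil => simp [pvALoop]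
  | cons l ls ih =>
    cases hm : pvIsTodoMarker l with
    | true => simp [pvALoop, hm, ih]
    | false =>
      cases hstop : pvIsStop l with
      | true =>
        simp [pvIsStop] at hstop
        obtain (h | h) | h := hstop <;>
          simp [pvALoop, pvIsStop, hm, h]
      | false =>
        simp [pvIsStop] at hstop
        simp [pvALoop, pvIsStop, hm, hstop, ih]

-- A's loop before the marker = locate the marker, then phase 2 on the tail
theorem pv_phase1 (ls : List String) :
    pvALoop ls false [] =
      match ls.findIdx? pvIsTodoMarker with
      | none => []
      | some i =>
        ((ls.drop (i + 1)).filter (fun l => !pvIsTodoMarker l)).takeWhile (fun l => !pvIsStop l) := by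
  induction ls with
  | nil => rfl
  | cons l ls ih =>
    by_cases hm : pvIsTodoMarker l
    · simp [pvALoop, hm, List.findIdx?_cons, pv_phase2]
    · simp [pvALoop, hm, List.findIdx?_cons, ih]
      cases h : ls.findIdx? pvIsTodoMarker <;> simp

-- ===== VERDICT (by name: the statement is the Claim_ definition above) =====
theorem extract_todo_section_spec : Claim_equal_extract_todo_section := by
  intro content _
  unfold Spec_extract_todo_section extract_todo_section extract_todo_section_alt
  rw [pv_phase1]
  cases h : (PySem.Str.splitlines content).findIdx? pvIsTodoMarker with
  | none => simp [h]
  | some i => simp [h, pv_take_findIdx_eq_takeWhile]
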